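-- pv_equiv track=rewrite | github.com/osvaldohg/algorithms | common_techniques_basic/sumOfTwo.py | sumOfTwo
-- ===== SOURCE A (Python) =====
-- def sumOfTwo(a, b, v):
--     x=[]
--     y={}
--
--     if len(a)<len(b):
--         x=a
--         for n in b:
--             y[n]=1
--     else:
--         x=b
--         for n in a:
--             y[n]=1
--
--     for num in x:
--         val=v-num
--         try:
--             if y[val]==1:
--                 return True
--         except:
--             pass
--     return False
-- ===== SOURCE B (Python) =====
-- def sumOfTwo(a, b, v):
--     return any(p + q == v for p in a for q in b)
-- ===== Notes on version B (the rewrite author's own statement) =====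
-- stated objective: simpler
-- what changed: Replaced A's build-a-hash-of-the-longer-list-then-scan-the-shorter approach with a plain nested existence scan over both lists (any over all pairs).
import Mathlib
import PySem

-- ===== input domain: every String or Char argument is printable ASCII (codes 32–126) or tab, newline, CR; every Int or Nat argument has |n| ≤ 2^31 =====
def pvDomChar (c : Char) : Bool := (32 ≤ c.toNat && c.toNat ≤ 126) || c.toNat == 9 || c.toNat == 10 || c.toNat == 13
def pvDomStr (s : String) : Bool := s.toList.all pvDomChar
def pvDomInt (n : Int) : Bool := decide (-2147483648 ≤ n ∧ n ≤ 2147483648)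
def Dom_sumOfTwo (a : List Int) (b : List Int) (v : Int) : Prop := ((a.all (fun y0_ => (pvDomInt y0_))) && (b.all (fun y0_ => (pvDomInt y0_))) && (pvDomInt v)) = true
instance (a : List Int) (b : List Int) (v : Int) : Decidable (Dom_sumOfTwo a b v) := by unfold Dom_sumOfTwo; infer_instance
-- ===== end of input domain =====

-- B replaces A's hash-the-longer-list-then-scan strategy by a plain nested existence scan over all pairs (simpler; not faster).


-- ===== PORT A =====
-- the 'for num in x: … try y[val]==1 … except: pass' loop, early-returning True
def sumOfTwoScan (y : PySem.Dict Int Int) (v : Int) : List Int → Bool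
  | [] => false
  | num :: rest =>
      match y.get? (v - num) with
      | some val => if val == 1 then true else sumOfTwoScan y v rest
      | none => sumOfTwoScan y v rest

def sumOfTwo (a : List Int) (b : List Int) (v : Int) : Bool :=
  if a.length < b.length then
    let y := b.foldl (fun d n => d.insert n 1) PySem.Dict.empty
    sumOfTwoScan y v a
  else
    let y := a.foldl (fun d n => d.insert n 1) PySem.Dict.empty
    sumOfTwoScan y v b

-- ===== PORT B =====
def sumOfTwo_alt (a : List Int) (b : List Int) (v : Int) : Bool :=
  a.any (fun p => b.any (fun q => p + q == v))

-- ===== PRECONDITION & SPEC =====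
def Spec_sumOfTwo (a : List Int) (b : List Int) (v : Int) (out : Bool) : Prop := out = sumOfTwo_alt a b v
instance (a : List Int) (b : List Int) (v : Int) (out : Bool) : Decidable (Spec_sumOfTwo a b v out) := by unfold Spec_sumOfTwo; infer_instance

-- ===== CLAIM (what is proved, stated in full; the proofs are below) =====
def Claim_equal_sumOfTwo : Prop := ∀ (a : List Int) (b : List Int) (v : Int), Dom_sumOfTwo a b v → Spec_sumOfTwo a b v (sumOfTwo a b v)

-- ===== LEMMAS AND PROOFS =====

-- the dict built by 'for n in l: y[n]=1' maps exactly the members of l to 1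
theorem buildY_get (l : List Int) (d : PySem.Dict Int Int) (k : Int) :
    (l.foldl (fun d n => d.insert n 1) d).get? k = if k ∈ l then some 1 else d.get? k := by
  induction l generalizing d with
  | nil => simp
  | cons n rest ih =>
    simp only [List.foldl_cons, ih, List.mem_cons]
    by_cases hk : k ∈ rest
    · simp [hk]
    · by_cases hn : k = n
      · simp [hn, PySem.Dict.get?_insert_self]
      · simp only [hk, hn, or_self, if_false]
        exact PySem.Dict.get?_insert_of_ne d 1 hn

theorem scan_true (y : PySem.Dict Int Int) (v : Int) (x : List Int) :
    sumOfTwoScan y v x = true ↔ ∃ num ∈ x, y.get? (v - num) = some 1 := by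
  induction x with
  | nil => simp [sumOfTwoScan]
  | cons num rest ih =>
    rw [sumOfTwoScan]
    cases h : y.get? (v - num) with
    | none =>
      simp only [ih, List.mem_cons]
      constructor
      · rintro ⟨m, hm, hg⟩; exact ⟨m, Or.inr hm, hg⟩
      · rintro ⟨m, hm | hm, hg⟩
        · subst hm; rw [h] at hg; cases hg
        · exact ⟨m, hm, hg⟩
    | some val =>
      by_cases hv : val = 1
      · subst hv
        simp only [beq_self_eq_true, if_true, true_iff]
        exact ⟨num, by simp, h⟩
      · simp only [beq_iff_eq, hv, if_false, ih, List.mem_cons]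
        constructor
        · rintro ⟨m, hm, hg⟩; exact ⟨m, Or.inr hm, hg⟩
        · rintro ⟨m, hm | hm, hg⟩
          · subst hm; rw [h] at hg; exact absurd (Option.some.inj hg) hv
          · exact ⟨m, hm, hg⟩

theorem alt_true (a b : List Int) (v : Int) :
    sumOfTwo_alt a b v = true ↔ ∃ p ∈ a, ∃ q ∈ b, p + q = v := by
  simp [sumOfTwo_alt]

theorem sumOfTwo_eq (a b : List Int) (v : Int) : sumOfTwo a b v = sumOfTwo_alt a b v := by
  have hiff : sumOfTwo a b v = true ↔ sumOfTwo_alt a b v = true := by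
    rw [alt_true]
    unfold sumOfTwo
    split
    · rw [scan_true]
      constructor
      · rintro ⟨num, hnum, hg⟩
        rw [buildY_get] at hg
        by_cases hb : v - num ∈ b
        · exact ⟨num, hnum, v - num, hb, by ring⟩
        · rw [if_neg hb] at hg
          simp [PySem.Dict.get?, PySem.Dict.empty] at hg
      · rintro ⟨p, hp, q, hq, hpq⟩
        refine ⟨p, hp, ?_⟩
        rw [buildY_get]
        have : v - p = q := by omega
        simp [this, hq]
    · rw [scan_true]
      constructor
      · rintro ⟨num, hnum, hg⟩
        rw [buildY_get] at hg
        by_cases ha : v - num ∈ a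
        · exact ⟨v - num, ha, num, hnum, by ring⟩
        · rw [if_neg ha] at hg
          simp [PySem.Dict.get?, PySem.Dict.empty] at hg
      · rintro ⟨p, hp, q, hq, hpq⟩
        refine ⟨q, hq, ?_⟩
        rw [buildY_get]
        have : v - q = p := by omega
        simp [this, hp]
  cases hA : sumOfTwo a b v <;> cases hB : sumOfTwo_alt a b v <;> simp_all

-- ===== VERDICT (by name: the statement is the Claim_ definition above) =====
theorem sumOfTwo_spec : Claim_equal_sumOfTwo := by
  intro a b v _
  unfold Spec_sumOfTwo
  exact sumOfTwo_eq a b v
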